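-- pv_equiv track=rewrite | github.com/Dummy-Bug/Data-Structures-and-Algorithms | 3 Striver's DP series/01 1d DP/01.2 Count Stairs Space Optimized.py | nthPoint
-- ===== SOURCE A (Python) =====
-- def nthPoint(n):
--
-- 	mod = 10**9 + 7
-- 	first_prev = 1;
-- 	second_prev = 1
--
-- 	for curr in range(2,n+1):
--
-- 	    curr = (first_prev + second_prev)%mod
--
-- 	    second_prev = first_prev
-- 	    first_prev  = curr
--
-- 	return first_prev
-- ===== SOURCE B (Python) =====
-- def nthPoint(n):
--     mod = 10**9 + 7
--
--     # (F(k) % mod, F(k+1) % mod) with F(0)=0, F(1)=1, by fast doubling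
--     def fib_pair(k):
--         if k == 0:
--             return (0, 1)
--         a, b = fib_pair(k // 2)
--         c = a * (2 * b - a) % mod
--         d = (a * a + b * b) % mod
--         if k % 2:
--             return (d, (c + d) % mod)
--         return (c, d)
--
--     if n <= 0:
--         return 1
--     return fib_pair(n)[1]
-- ===== Notes on version B (the rewrite author's own statement) =====
-- stated objective: faster
-- what changed: Replaced the linear two-variable Fibonacci loop with recursive fast doubling on the pair of adjacent Fibonacci numbers, computing the same staircase count modulo the prime in logarithmically many multiplications.
import Mathlib
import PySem

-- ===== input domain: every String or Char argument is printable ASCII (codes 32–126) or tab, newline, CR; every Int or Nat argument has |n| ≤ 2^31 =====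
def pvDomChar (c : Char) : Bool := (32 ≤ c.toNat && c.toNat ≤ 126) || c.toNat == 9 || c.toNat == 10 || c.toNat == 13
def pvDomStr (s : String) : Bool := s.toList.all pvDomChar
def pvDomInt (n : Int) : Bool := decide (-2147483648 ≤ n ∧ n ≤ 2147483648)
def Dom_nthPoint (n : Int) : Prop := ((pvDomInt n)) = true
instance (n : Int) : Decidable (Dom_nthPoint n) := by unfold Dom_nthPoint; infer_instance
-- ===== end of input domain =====

-- B replaces A's linear Fibonacci loop by recursive fast doubling (logarithmically many multiplications); same value modulo the prime.

-- ===== PORT A =====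
-- state (first_prev, second_prev); the loop variable 'curr' is immediately overwritten, so the fold ignores it
def nthPoint (n : Int) : Int :=
  ((PySem.List.pyRange 2 (n+1) 1).foldl
    (fun (st : Int × Int) _ => (PySem.Int.mod (st.1 + st.2) (10^9 + 7), st.1))
    (1, 1)).1

-- ===== PORT B =====
-- fib_pair from Source B: the pair (fib k, fib (k+1)) reduced modulo the prime, by fast doubling
def pvFibPair (k : Nat) : Int × Int :=
  if h : k = 0 then (0, 1)
  else
    let p := pvFibPair (k / 2)
    let c := PySem.Int.mod (p.1 * (2 * p.2 - p.1)) (10^9 + 7)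
    let d := PySem.Int.mod (p.1 * p.1 + p.2 * p.2) (10^9 + 7)
    if k % 2 = 1 then (d, PySem.Int.mod (c + d) (10^9 + 7)) else (c, d)
  termination_by k
  decreasing_by exact Nat.div_lt_self (Nat.pos_of_ne_zero h) one_lt_two

def nthPoint_alt (n : Int) : Int :=
  if n ≤ 0 then 1 else (pvFibPair n.toNat).2

-- ===== PRECONDITION & SPEC =====
def Spec_nthPoint (n : Int) (out : Int) : Prop := out = nthPoint_alt n
instance (n : Int) (out : Int) : Decidable (Spec_nthPoint n out) := by unfold Spec_nthPoint; infer_instance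

-- ===== CLAIM (what is proved, stated in full; the proofs are below) =====
def Claim_equal_nthPoint : Prop := ∀ (n : Int), Dom_nthPoint n → Spec_nthPoint n (nthPoint n)

-- ===== LEMMAS AND PROOFS =====

-- fast doubling computes Fibonacci modulo the prime
theorem pvFibPair_eq (k : Nat) :
    pvFibPair k = ((Nat.fib k : Int) % (10^9+7), (Nat.fib (k+1) : Int) % (10^9+7)) := by
  induction k using Nat.strong_induction_on with
  | _ k IH =>
  by_cases h0 : k = 0
  · subst h0; rw [pvFibPair]; norm_num
  · have hlt : k / 2 < k := Nat.div_lt_self (Nat.pos_of_ne_zero h0) one_lt_two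
    rw [pvFibPair]
    simp only [h0, dite_false, IH _ hlt,
      PySem.Int.mod_eq_emod_of_pos (show (0:Int) < 10^9+7 by norm_num)]
    set M : Int := 10^9 + 7 with hM
    set A : Int := (Nat.fib (k/2) : Int) with hA0
    set B : Int := (Nat.fib (k/2+1) : Int) with hB0
    have hA : Int.ModEq M (A % M) A := Int.emod_emod_of_dvd A dvd_rfl
    have hB : Int.ModEq M (B % M) B := Int.emod_emod_of_dvd B dvd_rfl
    have hc : (A % M * (2 * (B % M) - A % M)) % M = ((Nat.fib (2*(k/2)) : Int)) % M := by
      have hle : Nat.fib (k/2) ≤ 2 * Nat.fib (k/2+1) :=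
        le_trans (Nat.fib_le_fib_succ) (by omega)
      have h2 : (Nat.fib (2*(k/2)) : Int) = A * (2*B - A) := by
        rw [Nat.fib_two_mul]; push_cast [hle]; ring
      rw [h2]
      exact hA.mul ((hB.mul_left 2).sub hA)
    have hd : (A % M * (A % M) + B % M * (B % M)) % M = ((Nat.fib (2*(k/2)+1) : Int)) % M := by
      have h2 : (Nat.fib (2*(k/2)+1) : Int) = A*A + B*B := by
        rw [Nat.fib_two_mul_add_one]; push_cast; ring
      rw [h2]
      exact (hA.mul hA).add (hB.mul hB)
    by_cases hpar : k % 2 = 1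
    · have hk1 : 2*(k/2)+1 = k := by omega
      have hcd : ((A % M * (2 * (B % M) - A % M)) % M + (A % M * (A % M) + B % M * (B % M)) % M) % M
          = ((Nat.fib (k+1) : Int)) % M := by
        have hc' : Int.ModEq M ((A % M * (2 * (B % M) - A % M)) % M) ((Nat.fib (2*(k/2)) : Int)) := by
          unfold Int.ModEq
          rw [Int.emod_emod_of_dvd _ dvd_rfl, hc]
        have hd' : Int.ModEq M ((A % M * (A % M) + B % M * (B % M)) % M) ((Nat.fib (2*(k/2)+1) : Int)) := by
          unfold Int.ModEq
          rw [Int.emod_emod_of_dvd _ dvd_rfl, hd]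
        have hsum : (Nat.fib (k+1) : Int) = (Nat.fib (2*(k/2)) : Int) + (Nat.fib (2*(k/2)+1) : Int) := by
          have : k + 1 = 2*(k/2) + 2 := by omega
          rw [this, Nat.fib_add_two]; push_cast; ring
        rw [hsum]
        exact hc'.add hd'
      simp only [hpar, if_true]
      rw [hcd]
      rw [show 2*(k/2)+1 = k from hk1] at hd
      rw [hd]
    · have hk0 : 2*(k/2) = k := by omega
      simp only [hpar, if_false]
      rw [hk0] at hc
      rw [show 2*(k/2)+1 = k+1 by omega] at hd
      rw [hc, hd]

-- A's loop state after iterating 'k' times (upper bound k+2): (fib(k+2) % mod, fib(k+1) % mod)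
theorem pvLoopA_eq (k : Nat) :
    (PySem.List.pyRange 2 ((k : Int) + 2) 1).foldl
      (fun (st : Int × Int) _ => (PySem.Int.mod (st.1 + st.2) (10^9 + 7), st.1)) (1, 1)
    = ((Nat.fib (k+2) : Int) % (10^9+7), (Nat.fib (k+1) : Int) % (10^9+7)) := by
  induction k with
  | zero =>
    rw [show ((0 : Nat) : Int) + 2 = 2 by norm_num,
      PySem.List.pyRange_one_eq_nil (le_refl 2), List.foldl_nil]
    norm_num
  | succ k ih =>
    rw [show ((k+1 : Nat) : Int) + 2 = ((k:Int)+2) + 1 by push_cast; ring,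
      PySem.List.pyRange_one_succ_right (by omega), List.foldl_append, ih]
    simp only [List.foldl_cons, List.foldl_nil,
      PySem.Int.mod_eq_emod_of_pos (show (0:Int) < 10^9+7 by norm_num)]
    have hsum : (Nat.fib (k+1+2) : Int) = (Nat.fib (k+2) : Int) + (Nat.fib (k+1) : Int) := by
      rw [Nat.fib_add_two]; push_cast; ring
    rw [hsum]
    have hsplit : ((Nat.fib (k+2) : Int) + (Nat.fib (k+1) : Int)) % (10^9+7)
        = ((Nat.fib (k+2) : Int) % (10^9+7) + (Nat.fib (k+1) : Int) % (10^9+7)) % (10^9+7) :=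
      Int.add_emod _ _ _
    rw [hsplit]

-- ===== VERDICT (by name: the statement is the Claim_ definition above) =====
theorem nthPoint_spec : Claim_equal_nthPoint := by
  intro n _
  unfold Spec_nthPoint nthPoint nthPoint_alt
  by_cases hn : n ≤ 0
  · rw [if_pos hn, PySem.List.pyRange_one_eq_nil (by omega), List.foldl_nil]
  · rw [if_neg hn]
    have hk : ((n.toNat - 1 : Nat) : Int) + 2 = n + 1 := by omega
    rw [← hk, pvLoopA_eq, pvFibPair_eq]
    have h2 : n.toNat - 1 + 2 = n.toNat + 1 := by omega
    rw [h2]
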